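-- pv_equiv track=rewrite | github.com/NanayaHaruki/leetcode | 序号/1712. 将数组分成三个子数组的方案数.py | waysToSplit
-- ===== SOURCE A (Python) =====
-- from typing import List
--
-- def waysToSplit(nums: List[int]) -> int:
--     # 分割成3个子数组，先求出前缀和
--     n=len(nums)
--     ps=[0]*n
--     ps[0]=nums[0]
--     for i in range(1,n):
--         ps[i]=ps[i-1]+nums[i]
--     ans=0
--     for i in range(n-2):
--         # 先找到满足mid>=left的左边界位置，再找到能够满足mid<=right的右边界位置
--         l,r=i,n-1
--         while l+1<r:
--             m=(l+r)//2
--             if ps[i]<=ps[m]-ps[i]: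
--                 r=m
--             else:
--                 l=m
--         # r为左边界
--         left=r
--         l,r=r-1,n-1
--         while l+1<r:
--             m=(l+r)//2
--             if ps[m]-ps[i]<=ps[-1]-ps[m]:
--                 l=m
--             else:
--                 r=m
--         ans+=l-left+1
--     return ans%int(1e9+7)
-- ===== SOURCE B (Python) =====
-- from typing import List
--
-- def waysToSplit(nums: List[int]) -> int:
--     # prefix sums, then directly count the (i, m) pairs whose three sums are ordered
--     ps = []
--     s = 0
--     for x in nums:
--         s += x
--         ps.append(s)
--     n = len(nums)
--     ans = 0
--     for i in range(n - 2):
--         for m in range(i + 1, n - 1):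
--             if 2 * ps[i] <= ps[m] and 2 * ps[m] <= ps[i] + ps[n - 1]:
--                 ans += 1
--     return ans % (10 ** 9 + 7)
-- ===== Notes on version B (the rewrite author's own statement) =====
-- stated objective: simpler
-- what changed: replaces the two per-i binary searches over the prefix-sum array by a direct count of the midpoints m with 2*ps[i] <= ps[m] and 2*ps[m] <= ps[i] + ps[-1]
-- outside the precondition, e.g. on waysToSplit([0, 2, 1, -1, 3, -1]): A returns 1, B returns 2
import Mathlib
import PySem

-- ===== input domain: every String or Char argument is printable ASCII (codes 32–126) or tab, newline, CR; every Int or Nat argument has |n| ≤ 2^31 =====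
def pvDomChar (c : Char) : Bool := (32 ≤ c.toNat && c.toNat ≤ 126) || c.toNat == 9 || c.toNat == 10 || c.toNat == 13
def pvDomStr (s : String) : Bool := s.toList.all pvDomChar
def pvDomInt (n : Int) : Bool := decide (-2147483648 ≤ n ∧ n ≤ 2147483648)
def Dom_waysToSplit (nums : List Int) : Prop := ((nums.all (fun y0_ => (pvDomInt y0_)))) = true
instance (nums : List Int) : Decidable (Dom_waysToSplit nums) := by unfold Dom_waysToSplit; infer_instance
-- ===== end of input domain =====

-- B replaces A's two per-i binary searches over the prefix sums by a direct count of the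
-- valid midpoints (simpler; only valid-range inputs with non-decreasing inner prefix sums are claimed, see Pre_).


-- ===== PORT A =====
-- ps=[0]*n; ps[0]=nums[0]; for i in range(1,n): ps[i]=ps[i-1]+nums[i]
def pvPsA (nums : List Int) : List Int :=
  (PySem.List.pyRange 1 (nums.length : Int) 1).foldl
    (fun ps i =>
      PySem.List.pySetD ps i (PySem.List.pyGetD ps (i - 1) 0 + PySem.List.pyGetD nums i 0))
    (PySem.List.pySetD (List.replicate nums.length (0 : Int)) 0 (PySem.List.pyGetD nums 0 0))

-- first while loop: l,r=i,n-1; while l+1<r: m=(l+r)//2; if ps[i]<=ps[m]-ps[i]: r=m else l=m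
def pvBs1 (ps : List Int) (psi l r : Int) : Int × Int :=
  if _h : l + 1 < r then
    if psi ≤ PySem.List.pyGetD ps (PySem.Int.floordiv (l + r) 2) 0 - psi then
      pvBs1 ps psi l (PySem.Int.floordiv (l + r) 2)
    else
      pvBs1 ps psi (PySem.Int.floordiv (l + r) 2) r
  else (l, r)
termination_by (r - l).toNat
decreasing_by
  all_goals
    (have hm : PySem.Int.floordiv (l + r) 2 = (l + r) / 2 :=
      PySem.Int.floordiv_eq_ediv_of_pos (by norm_num)
     rw [hm]; omega)

-- second while loop: l,r=left-1,n-1; while l+1<r: m=(l+r)//2; if ps[m]-ps[i]<=ps[-1]-ps[m]: l=m else r=m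
def pvBs2 (ps : List Int) (psi plast l r : Int) : Int × Int :=
  if _h : l + 1 < r then
    if PySem.List.pyGetD ps (PySem.Int.floordiv (l + r) 2) 0 - psi ≤
        plast - PySem.List.pyGetD ps (PySem.Int.floordiv (l + r) 2) 0 then
      pvBs2 ps psi plast (PySem.Int.floordiv (l + r) 2) r
    else
      pvBs2 ps psi plast l (PySem.Int.floordiv (l + r) 2)
  else (l, r)
termination_by (r - l).toNat
decreasing_by
  all_goals
    (have hm : PySem.Int.floordiv (l + r) 2 = (l + r) / 2 :=
      PySem.Int.floordiv_eq_ediv_of_pos (by norm_num)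
     rw [hm]; omega)

def waysToSplit (nums : List Int) : Int :=
  let n : Int := nums.length
  let ps := pvPsA nums
  let ans := (PySem.List.pyRange 0 (n - 2) 1).foldl
    (fun ans i =>
      let left := (pvBs1 ps (PySem.List.pyGetD ps i 0) i (n - 1)).2
      let l := (pvBs2 ps (PySem.List.pyGetD ps i 0) (PySem.List.pyGetD ps (-1) 0)
                  (left - 1) (n - 1)).1
      ans + (l - left + 1)) 0
  PySem.Int.mod ans 1000000007

-- ===== PORT B =====
def waysToSplit_alt (nums : List Int) : Int :=
  let ps := (nums.foldl (fun (acc : List Int × Int) x => (acc.1 ++ [acc.2 + x], acc.2 + x))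
              ([], 0)).1
  let n : Int := nums.length
  let ans := (PySem.List.pyRange 0 (n - 2) 1).foldl
    (fun ans i =>
      (PySem.List.pyRange (i + 1) (n - 1) 1).foldl
        (fun ans m =>
          if 2 * PySem.List.pyGetD ps i 0 ≤ PySem.List.pyGetD ps m 0 ∧
             2 * PySem.List.pyGetD ps m 0 ≤
               PySem.List.pyGetD ps i 0 + PySem.List.pyGetD ps (n - 1) 0
          then ans + 1 else ans) ans) 0
  PySem.Int.mod ans 1000000007

-- ===== PRECONDITION & SPEC =====
-- Pre_ excludes the empty list (A raises IndexError) and lists with a negative element at a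
-- position in [2, n-2] (outside the problem's stated domain 0 <= nums[i]; there the inner prefix
-- sums are not non-decreasing and the values of A's binary searches are unspecifiable).
def Pre_waysToSplit (nums : List Int) : Prop :=
  nums ≠ [] ∧ ∀ x ∈ (nums.drop 2).dropLast, 0 ≤ x
instance (nums : List Int) : Decidable (Pre_waysToSplit nums) := by
  unfold Pre_waysToSplit; infer_instance
def pvWitness_waysToSplit : List Int := [1, 2, 2, 2, 5]

def Spec_waysToSplit (nums : List Int) (out : Int) : Prop := out = waysToSplit_alt nums
instance (nums : List Int) (out : Int) : Decidable (Spec_waysToSplit nums out) := by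
  unfold Spec_waysToSplit; infer_instance

-- ===== CLAIM (what is proved, stated in full; the proofs are below) =====
def Claim_equal_waysToSplit : Prop :=
  ∀ (nums : List Int), Dom_waysToSplit nums → Pre_waysToSplit nums →
    Spec_waysToSplit nums (waysToSplit nums)

-- ===== LEMMAS AND PROOFS =====

-- the list of prefix sums starting from accumulator s (proof-only)
def pvPsFrom (s : Int) : List Int → List Int
  | [] => []
  | x :: xs => (s + x) :: pvPsFrom (s + x) xs

theorem pvPsFrom_length (s : Int) (l : List Int) : (pvPsFrom s l).length = l.length := by
  induction l generalizing s with
  | nil => rfl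
  | cons x xs ih => simp [pvPsFrom, ih]

theorem pvPsFrom_getElem (s : Int) (l : List Int) (k : Nat) (h : k < l.length)
    (h' : k < (pvPsFrom s l).length) :
    (pvPsFrom s l)[k] = s + (l.take (k + 1)).sum := by
  induction l generalizing s k with
  | nil => simp at h
  | cons x xs ih =>
    cases k with
    | zero => simp [pvPsFrom]
    | succ k =>
      have hk : k < xs.length := by simpa using h
      have hk' : k < (pvPsFrom (s + x) xs).length := by
        simpa [pvPsFrom_length] using hk
      simp only [pvPsFrom, List.getElem_cons_succ, ih (s + x) k hk hk']
      simp
      ring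

theorem pvPsFrom_append (s : Int) (l1 l2 : List Int) :
    pvPsFrom s (l1 ++ l2) = pvPsFrom s l1 ++ pvPsFrom (s + l1.sum) l2 := by
  induction l1 generalizing s with
  | nil => simp [pvPsFrom]
  | cons x xs ih => simp [pvPsFrom, ih, add_assoc]

-- A's in-place prefix-sum loop builds exactly pvPsFrom 0 nums
theorem pvPsA_eq (nums : List Int) : pvPsA nums = pvPsFrom 0 nums := by
  cases hnums : nums with
  | nil => rfl
  | cons x0 xs0 =>
  rw [← hnums]
  have hne : nums ≠ [] := by rw [hnums]; simp
  have hn1 : 1 ≤ nums.length := by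
    rw [hnums]; simp
  have inv : ∀ j : Nat, 1 ≤ j → j ≤ nums.length →
      (PySem.List.pyRange 1 (j : Int) 1).foldl
        (fun ps i =>
          PySem.List.pySetD ps i (PySem.List.pyGetD ps (i - 1) 0 + PySem.List.pyGetD nums i 0))
        (PySem.List.pySetD (List.replicate nums.length (0 : Int)) 0 (PySem.List.pyGetD nums 0 0))
      = pvPsFrom 0 (nums.take j) ++ List.replicate (nums.length - j) 0 := by
    intro j
    induction j with
    | zero => omega
    | succ j ihj =>
      intro _ hjn
      rcases Nat.eq_zero_or_pos j with hj0 | hj1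
      · subst hj0
        have hr : PySem.List.pyRange 1 ((1 : Nat) : Int) 1 = [] :=
          PySem.List.pyRange_one_eq_nil (by norm_num)
        rw [show ((0 + 1 : Nat) : Int) = ((1 : Nat) : Int) by norm_num, hr]
        simp only [List.foldl_nil]
        rw [hnums]
        rw [PySem.List.pyGetD_zero_cons]
        rw [PySem.List.pySetD_of_nonneg _ _ (by norm_num)]
        simp [pvPsFrom, List.replicate_succ]
      · have hjn' : j ≤ nums.length := by omega
        have hstep := ihj hj1 hjn'
        have hr : PySem.List.pyRange 1 (((j + 1 : Nat)) : Int) 1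
            = PySem.List.pyRange 1 ((j : Nat) : Int) 1 ++ [((j : Nat) : Int)] := by
          push_cast
          exact PySem.List.pyRange_one_succ_right (by exact_mod_cast hj1)
        rw [hr, List.foldl_append, hstep]
        simp only [List.foldl_cons, List.foldl_nil]
        -- compute the two reads
        have hlenL : (pvPsFrom 0 (nums.take j)).length = j := by
          rw [pvPsFrom_length, List.length_take]; omega
        have hj1n : j < nums.length := by omega
        have hread1 : PySem.List.pyGetD
            (pvPsFrom 0 (nums.take j) ++ List.replicate (nums.length - j) 0)
            (((j : Nat) : Int) - 1) 0 = (nums.take j).sum := by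
          rw [show (((j : Nat) : Int) - 1) = (((j - 1 : Nat)) : Int) by omega]
          rw [PySem.List.pyGetD_natCast]
          rw [List.getD_append _ _ _ _ (by omega)]
          rw [List.getD_eq_getElem _ _ (by omega)]
          rw [pvPsFrom_getElem 0 (nums.take j) (j - 1) (by simp [List.length_take]; omega) (by omega)]
          rw [show j - 1 + 1 = j by omega, List.take_take]
          simp [min_self]
        have hread2 : PySem.List.pyGetD nums ((j : Nat) : Int) 0 = nums[j]'hj1n := by
          rw [PySem.List.pyGetD_natCast]
          exact List.getD_eq_getElem _ _ hj1n
        rw [hread1, hread2]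
        rw [PySem.List.pySetD_of_nonneg _ _ (by positivity)]
        rw [Int.toNat_natCast]
        rw [List.set_append]
        rw [if_neg (by omega)]
        have hrep : List.replicate (nums.length - j) (0 : Int)
            = 0 :: List.replicate (nums.length - (j + 1)) 0 := by
          rw [show nums.length - j = (nums.length - (j + 1)) + 1 by omega, List.replicate_succ]
        rw [hrep]
        rw [show j - (pvPsFrom 0 (nums.take j)).length = 0 by omega]
        have htake : nums.take (j + 1) = nums.take j ++ [nums[j]'hj1n] := by
          rw [List.take_add_one]
          congr 1
          rw [List.getElem?_eq_getElem hj1n]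
          rfl
        rw [htake, pvPsFrom_append]
        simp [pvPsFrom]
  have := inv nums.length hn1 le_rfl
  unfold pvPsA
  rw [this]
  simp

-- B's accumulate loop builds exactly pvPsFrom
theorem pvBAccum (l : List Int) (lst : List Int) (s : Int) :
    l.foldl (fun (acc : List Int × Int) x => (acc.1 ++ [acc.2 + x], acc.2 + x)) (lst, s)
      = (lst ++ pvPsFrom s l, s + l.sum) := by
  induction l generalizing lst s with
  | nil => simp [pvPsFrom]
  | cons x xs ih => simp [pvPsFrom, ih, add_assoc]

theorem pvGetS (nums : List Int) (i : Int) (h0 : 0 ≤ i) (h1 : i < (nums.length : Int)) :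
    PySem.List.pyGetD (pvPsFrom 0 nums) i 0 = (nums.take (i.toNat + 1)).sum := by
  have hl : i.toNat < nums.length := by omega
  have hl' : i.toNat < (pvPsFrom 0 nums).length := by
    simpa [pvPsFrom_length] using hl
  rw [PySem.List.pyGetD_eq_getElem _ _ h0 (by simpa [pvPsFrom_length] using h1)]
  rw [pvPsFrom_getElem 0 nums i.toNat hl hl']
  ring

theorem pvGetLast (nums : List Int) (hne : nums ≠ []) :
    PySem.List.pyGetD (pvPsFrom 0 nums) (-1) 0 = (nums.take ((nums.length - 1) + 1)).sum := by
  have hne' : pvPsFrom 0 nums ≠ [] := by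
    intro h
    have := pvPsFrom_length 0 nums
    rw [h] at this
    exact hne (List.eq_nil_of_length_eq_zero this.symm)
  rw [PySem.List.pyGetD_neg_one _ _ hne']
  rw [List.getLast_eq_getElem]
  have hlen : (pvPsFrom 0 nums).length = nums.length := pvPsFrom_length 0 nums
  have h1 : nums.length - 1 < nums.length := by
    cases nums with
    | nil => exact absurd rfl hne
    | cons x xs => simp
  have h2 : (pvPsFrom 0 nums).length - 1 < (pvPsFrom 0 nums).length := by omega
  have := pvPsFrom_getElem 0 nums (nums.length - 1) h1 (by omega)
  simp only [hlen]
  rw [this]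
  ring

-- monotonicity of the inner prefix sums under Pre_
theorem pvMono (nums : List Int) (hpre : ∀ x ∈ (nums.drop 2).dropLast, 0 ≤ x)
    (j k : Nat) (hj : 1 ≤ j) (hjk : j ≤ k) (hk : (k : Int) ≤ (nums.length : Int) - 2) :
    (nums.take (j + 1)).sum ≤ (nums.take (k + 1)).sum := by
  have key : ∀ t : Nat, 2 ≤ t → (t : Int) ≤ (nums.length : Int) - 2 → 0 ≤ nums[t]! := by
    intro t ht2 htn
    have hlen : ((nums.drop 2).dropLast).length = nums.length - 2 - 1 := by
      simp [List.length_dropLast]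
    have htl : t - 2 < ((nums.drop 2).dropLast).length := by omega
    have hmem : ((nums.drop 2).dropLast)[t - 2] ∈ (nums.drop 2).dropLast :=
      List.getElem_mem htl
    have hval : ((nums.drop 2).dropLast)[t - 2] = nums[t]'(by omega) := by
      rw [List.getElem_dropLast, List.getElem_drop]
      congr 1
      omega
    have := hpre _ hmem
    rw [hval] at this
    rwa [getElem!_pos nums t (by omega)]
  clear hpre
  induction k with
  | zero => omega
  | succ k ih =>
    rcases Nat.lt_or_ge j (k + 1) with hlt | hge
    · have hstep : (nums.take (k + 1)).sum ≤ (nums.take (k + 1 + 1)).sum := by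
        have hk1 : k + 1 < nums.length := by omega
        rw [List.sum_take_succ nums (k + 1) hk1]
        have := key (k + 1) (by omega) (by push_cast; omega)
        rw [getElem!_pos nums (k + 1) hk1] at this
        omega
      have := ih (by omega) (by push_cast at hk ⊢; omega)
      omega
    · have : j = k + 1 := by omega
      subst this
      omega

theorem pvBs1_spec (ps : List Int) (psi lo hi : Int)
    (hmono : ∀ k m : Int, lo ≤ k → k ≤ m → m ≤ hi →
      psi ≤ PySem.List.pyGetD ps k 0 - psi → psi ≤ PySem.List.pyGetD ps m 0 - psi) :
    ∀ (N : Nat) (l r : Int), (r - l).toNat ≤ N → lo ≤ l + 1 → r - 1 ≤ hi → l < r →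
      l < (pvBs1 ps psi l r).2 ∧ (pvBs1 ps psi l r).2 ≤ r ∧
      ((pvBs1 ps psi l r).2 = r ∨ psi ≤ PySem.List.pyGetD ps (pvBs1 ps psi l r).2 0 - psi) ∧
      ∀ m : Int, l < m → m < (pvBs1 ps psi l r).2 → ¬ (psi ≤ PySem.List.pyGetD ps m 0 - psi) := by
  intro N
  induction N with
  | zero => intro l r hN _ _ hlr; omega
  | succ N ih =>
    intro l r hN hlo hhi hlr
    rw [pvBs1]
    by_cases h : l + 1 < r
    · rw [dif_pos h]
      have hmeq : PySem.Int.floordiv (l + r) 2 = (l + r) / 2 :=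
        PySem.Int.floordiv_eq_ediv_of_pos (by norm_num)
      set m := PySem.Int.floordiv (l + r) 2 with hmdef
      have hmb : l + 1 ≤ m ∧ m ≤ r - 1 := by omega
      by_cases hc : psi ≤ PySem.List.pyGetD ps m 0 - psi
      · rw [if_pos hc]
        obtain ⟨h1, h2, h3, h4⟩ :=
          ih l m (by omega) hlo (by omega) (by omega)
        refine ⟨h1, by omega, ?_, h4⟩
        rcases h3 with h3 | h3
        · right; rwa [h3]
        · right; exact h3
      · rw [if_neg hc]
        obtain ⟨h1, h2, h3, h4⟩ :=
          ih m r (by omega) (by omega) hhi (by omega)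
        refine ⟨by omega, h2, h3, ?_⟩
        intro x hx1 hx2 hfx
        rcases lt_or_ge m x with hmx | hxm
        · exact h4 x hmx hx2 hfx
        · exact hc (hmono x m (by omega) hxm (by omega) hfx)
    · rw [dif_neg h]
      exact ⟨hlr, le_refl r, Or.inl rfl, fun m h1 h2 => by omega⟩

theorem pvBs2_spec (ps : List Int) (psi plast lo hi : Int)
    (hanti : ∀ k m : Int, lo ≤ k → k ≤ m → m ≤ hi →
      PySem.List.pyGetD ps m 0 - psi ≤ plast - PySem.List.pyGetD ps m 0 →
      PySem.List.pyGetD ps k 0 - psi ≤ plast - PySem.List.pyGetD ps k 0) :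
    ∀ (N : Nat) (l r : Int), (r - l).toNat ≤ N → lo ≤ l + 1 → r - 1 ≤ hi → l < r →
      l ≤ (pvBs2 ps psi plast l r).1 ∧ (pvBs2 ps psi plast l r).1 < r ∧
      ((pvBs2 ps psi plast l r).1 = l ∨
        PySem.List.pyGetD ps (pvBs2 ps psi plast l r).1 0 - psi ≤
          plast - PySem.List.pyGetD ps (pvBs2 ps psi plast l r).1 0) ∧
      ∀ m : Int, (pvBs2 ps psi plast l r).1 < m → m < r →
        ¬ (PySem.List.pyGetD ps m 0 - psi ≤ plast - PySem.List.pyGetD ps m 0) := by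
  intro N
  induction N with
  | zero => intro l r hN _ _ hlr; omega
  | succ N ih =>
    intro l r hN hlo hhi hlr
    rw [pvBs2]
    by_cases h : l + 1 < r
    · rw [dif_pos h]
      have hmeq : PySem.Int.floordiv (l + r) 2 = (l + r) / 2 :=
        PySem.Int.floordiv_eq_ediv_of_pos (by norm_num)
      set m := PySem.Int.floordiv (l + r) 2 with hmdef
      have hmb : l + 1 ≤ m ∧ m ≤ r - 1 := by omega
      by_cases hc : PySem.List.pyGetD ps m 0 - psi ≤ plast - PySem.List.pyGetD ps m 0
      · rw [if_pos hc]
        obtain ⟨h1, h2, h3, h4⟩ :=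
          ih m r (by omega) (by omega) hhi (by omega)
        refine ⟨by omega, h2, ?_, h4⟩
        rcases h3 with h3 | h3
        · right; rwa [h3]
        · right; exact h3
      · rw [if_neg hc]
        obtain ⟨h1, h2, h3, h4⟩ :=
          ih l m (by omega) hlo (by omega) (by omega)
        refine ⟨h1, by omega, h3, ?_⟩
        intro x hx1 hx2 hgx
        rcases lt_or_ge x m with hxm | hmx
        · exact h4 x hx1 hxm hgx
        · exact hc (hanti m x (by omega) hmx (by omega) hgx)
    · rw [dif_neg h]
      exact ⟨le_refl l, hlr, Or.inl rfl, fun m h1 h2 => by omega⟩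

theorem pvCount_range (a : Int) :
    ∀ (N : Nat) (c d : Int), a ≤ c → d < a + N → c ≤ d + 1 →
    ((List.range N).countP (fun (k : Nat) => decide (c ≤ a + (k : Int) ∧ a + (k : Int) ≤ d)) : Int)
      = d + 1 - c := by
  intro N
  induction N with
  | zero =>
    intro c d hac hd hcd
    simp at hd ⊢
    omega
  | succ N ih =>
    intro c d hac hd hcd
    rw [List.range_succ, List.countP_append]
    have hN : List.countP (fun (k : Nat) => decide (c ≤ a + (k : Int) ∧ a + (k : Int) ≤ d)) [N]
        = if c ≤ a + (N : Int) ∧ a + (N : Int) ≤ d then 1 else 0 := by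
      simp only [List.countP_cons, List.countP_nil]
      by_cases h : c ≤ a + (N : Int) ∧ a + (N : Int) ≤ d
      · simp [h]
      · simp [h]
    rw [hN]
    rcases lt_or_ge d (a + N) with hlt | hge
    · have := ih c d hac (by omega) hcd
      have hcond : ¬ (c ≤ a + (N : Int) ∧ a + (N : Int) ≤ d) := by omega
      rw [if_neg hcond]
      push_cast at this ⊢
      omega
    · rcases lt_or_ge d c with hdc | hcd'
      · have h0 : List.countP (fun (k : Nat) => decide (c ≤ a + (k : Int) ∧ a + (k : Int) ≤ d)) (List.range N) = 0 := by
          rw [List.countP_eq_zero]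
          intro k _
          simp only [decide_eq_true_eq]
          omega
        have hcond : ¬ (c ≤ a + (N : Int) ∧ a + (N : Int) ≤ d) := by omega
        rw [if_neg hcond, h0]
        push_cast
        omega
      · have hdN : d = a + N := by push_cast at hd; omega
        have hcond : (c ≤ a + (N : Int) ∧ a + (N : Int) ≤ d) := by omega
        rw [if_pos hcond]
        have hcongr : List.countP (fun (k : Nat) => decide (c ≤ a + (k : Int) ∧ a + (k : Int) ≤ d)) (List.range N)
            = List.countP (fun (k : Nat) => decide (c ≤ a + (k : Int) ∧ a + (k : Int) ≤ d - 1)) (List.range N) := by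
          apply List.countP_congr
          intro k hk
          rw [List.mem_range] at hk
          simp only [decide_eq_true_eq]
          omega
        rw [hcongr]
        have := ih c (d - 1) hac (by omega) (by omega)
        push_cast at this ⊢
        omega

theorem pvCount_pyRange (a b c d : Int) (p : Int → Prop) [DecidablePred p]
    (hp : ∀ m : Int, a ≤ m → m < b → (p m ↔ (c ≤ m ∧ m ≤ d)))
    (hac : a ≤ c) (hdb : d < b) (hcd : c ≤ d + 1) :
    ((PySem.List.pyRange a b 1).countP (fun m => decide (p m)) : Int) = d + 1 - c := by
  rw [PySem.List.pyRange_one, List.countP_map]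
  have hcongr : List.countP ((fun m => decide (p m)) ∘ fun k : Nat => a + (k : Int)) (List.range (b - a).toNat)
      = List.countP (fun k : Nat => decide (c ≤ a + (k : Int) ∧ a + (k : Int) ≤ d)) (List.range (b - a).toNat) := by
    apply List.countP_congr
    intro k hk
    rw [List.mem_range] at hk
    simp only [Function.comp_apply, decide_eq_true_eq]
    exact hp (a + k) (by omega) (by omega)
  rw [hcongr]
  exact pvCount_range a (b - a).toNat c d hac (by omega) hcd

-- per-iteration agreement: A's two binary searches count exactly B's midpoints
theorem pvPerI (nums : List Int) (hne : nums ≠ [])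
    (hpre : ∀ x ∈ (nums.drop 2).dropLast, 0 ≤ x)
    (hn3 : 3 ≤ (nums.length : Int)) (i : Int) (hi0 : 0 ≤ i)
    (hi : i < (nums.length : Int) - 2) :
    (pvBs2 (pvPsFrom 0 nums) (PySem.List.pyGetD (pvPsFrom 0 nums) i 0)
        (PySem.List.pyGetD (pvPsFrom 0 nums) (-1) 0)
        ((pvBs1 (pvPsFrom 0 nums) (PySem.List.pyGetD (pvPsFrom 0 nums) i 0) i
            ((nums.length : Int) - 1)).2 - 1) ((nums.length : Int) - 1)).1
      - (pvBs1 (pvPsFrom 0 nums) (PySem.List.pyGetD (pvPsFrom 0 nums) i 0) i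
            ((nums.length : Int) - 1)).2 + 1
    = ((PySem.List.pyRange (i + 1) ((nums.length : Int) - 1) 1).countP
        (fun m => decide (2 * PySem.List.pyGetD (pvPsFrom 0 nums) i 0 ≤
            PySem.List.pyGetD (pvPsFrom 0 nums) m 0 ∧
          2 * PySem.List.pyGetD (pvPsFrom 0 nums) m 0 ≤
            PySem.List.pyGetD (pvPsFrom 0 nums) i 0 +
            PySem.List.pyGetD (pvPsFrom 0 nums) ((nums.length : Int) - 1) 0)) : Int) := by
  set ps := pvPsFrom 0 nums with hps
  set n : Int := (nums.length : Int) with hn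
  -- indexed reads are prefix sums
  have hget : ∀ m : Int, 0 ≤ m → m < n → PySem.List.pyGetD ps m 0 = (nums.take (m.toNat + 1)).sum := by
    intro m h0 h1
    exact pvGetS nums m h0 h1
  -- monotone reads on [1, n-2]
  have hmono : ∀ k m : Int, 1 ≤ k → k ≤ m → m ≤ n - 2 →
      PySem.List.pyGetD ps k 0 ≤ PySem.List.pyGetD ps m 0 := by
    intro k m hk hkm hm
    rw [hget k (by omega) (by omega), hget m (by omega) (by omega)]
    exact pvMono nums hpre k.toNat m.toNat (by omega) (by omega) (by rw [← hn]; omega)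
  have hlast : PySem.List.pyGetD ps (-1) 0 = PySem.List.pyGetD ps (n - 1) 0 := by
    rw [pvGetLast nums hne, hget (n - 1) (by omega) (by omega)]
    congr 2
    omega
  set psi := PySem.List.pyGetD ps i 0 with hpsi
  set plast := PySem.List.pyGetD ps (-1) 0 with hplast
  -- first binary search
  have hmono1 : ∀ k m : Int, i + 1 ≤ k → k ≤ m → m ≤ n - 2 →
      psi ≤ PySem.List.pyGetD ps k 0 - psi → psi ≤ PySem.List.pyGetD ps m 0 - psi := by
    intro k m hk hkm hm hf
    have := hmono k m (by omega) hkm hm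
    omega
  obtain ⟨hl1, hl2, hl3, hl4⟩ :=
    pvBs1_spec ps psi (i + 1) (n - 2) hmono1 ((n - 1) - i).toNat i (n - 1)
      (le_refl _) (by omega) (by omega) (by omega)
  set left := (pvBs1 ps psi i (n - 1)).2 with hleft
  -- second binary search
  have hanti2 : ∀ k m : Int, i + 1 ≤ k → k ≤ m → m ≤ n - 2 →
      PySem.List.pyGetD ps m 0 - psi ≤ plast - PySem.List.pyGetD ps m 0 →
      PySem.List.pyGetD ps k 0 - psi ≤ plast - PySem.List.pyGetD ps k 0 := by
    intro k m hk hkm hm hg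
    have := hmono k m (by omega) hkm hm
    omega
  obtain ⟨hb1, hb2, hb3, hb4⟩ :=
    pvBs2_spec ps psi plast (i + 1) (n - 2) hanti2 ((n - 1) - (left - 1)).toNat
      (left - 1) (n - 1) (le_refl _) (by omega) (by omega) (by omega)
  set L := (pvBs2 ps psi plast (left - 1) (n - 1)).1 with hL
  -- count the valid midpoints
  have hcount := pvCount_pyRange (i + 1) (n - 1) left L
    (fun m => 2 * PySem.List.pyGetD ps i 0 ≤ PySem.List.pyGetD ps m 0 ∧
      2 * PySem.List.pyGetD ps m 0 ≤ PySem.List.pyGetD ps i 0 + PySem.List.pyGetD ps (n - 1) 0)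
    ?_ (by omega) (by omega) (by omega)
  · rw [hcount]
    omega
  · intro m hm1 hm2
    constructor
    · rintro ⟨hc1, hc2⟩
      constructor
      · by_contra hlt
        exact hl4 m (by omega) (by omega) (by omega)
      · by_contra hgt
        exact hb4 m (by omega) (by omega) (by rw [← hlast] at hc2; omega)
    · rintro ⟨hm3, hm4⟩
      have hfm : psi ≤ PySem.List.pyGetD ps m 0 - psi := by
        have hleftn : left ≠ n - 1 := by omega
        have hfl : psi ≤ PySem.List.pyGetD ps left 0 - psi := by
          rcases hl3 with h | h
          · exact absurd h hleftn
          · exact h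
        exact hmono1 left m (by omega) hm3 (by omega) hfl
      have hgm : PySem.List.pyGetD ps m 0 - psi ≤ plast - PySem.List.pyGetD ps m 0 := by
        have hLl : L ≠ left - 1 := by omega
        have hgL : PySem.List.pyGetD ps L 0 - psi ≤ plast - PySem.List.pyGetD ps L 0 := by
          rcases hb3 with h | h
          · exact absurd h hLl
          · exact h
        exact hanti2 m L (by omega) hm4 (by omega) hgL
      rw [← hlast]
      constructor
      · omega
      · omega


-- the two programs agree under Pre_
theorem pvMain (nums : List Int) (hne : nums ≠ [])
    (hpre : ∀ x ∈ (nums.drop 2).dropLast, 0 ≤ x) :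
    waysToSplit nums = waysToSplit_alt nums := by
  unfold waysToSplit waysToSplit_alt
  simp only [pvPsA_eq, pvBAccum, List.nil_append]
  congr 1
  rw [PySem.List.foldl_add]
  rw [PySem.List.foldl_congr_mem' _ _
    (fun (acc i : Int) => acc +
      ((PySem.List.pyRange (i + 1) ((nums.length : Int) - 1) 1).countP
        (fun m => decide (2 * PySem.List.pyGetD (pvPsFrom 0 nums) i 0 ≤
            PySem.List.pyGetD (pvPsFrom 0 nums) m 0 ∧
          2 * PySem.List.pyGetD (pvPsFrom 0 nums) m 0 ≤
            PySem.List.pyGetD (pvPsFrom 0 nums) i 0 +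
            PySem.List.pyGetD (pvPsFrom 0 nums) ((nums.length : Int) - 1) 0)) : Int)) 0
    ?_]
  · rw [PySem.List.foldl_add]
    refine congrArg (fun t : List Int => (0 : Int) + t.sum) (List.map_congr_left ?_)
    intro i hi
    rw [PySem.List.mem_pyRange_one] at hi
    exact pvPerI nums hne hpre (by omega) i hi.1 hi.2
  · intro i _ acc
    exact PySem.List.foldl_ite_add_one _ _ _

-- ===== VERDICT (by name: the statement is the Claim_ definition above) =====
theorem waysToSplit_spec : Claim_equal_waysToSplit := by
  intro nums _ hpre
  unfold Pre_waysToSplit at hpre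
  unfold Spec_waysToSplit
  exact pvMain nums hpre.1 hpre.2
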